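-- pv_equiv track=rewrite | github.com/joemcdowell/pythonprojects | Learning Python/EvenSubarray.py | evenSubarray
-- ===== SOURCE A (Python) =====
-- def evenSubarray(numbers, k):
--     count = 0
--     n = len(numbers)
--     mem = set()
--
--     for i in range(n):
--         temp = []
--         odd = 0
--         for j in range(i, n):
--             if numbers[j] % 2:
--                 odd += 1
--             temp.append(numbers[j])
--             temp2 = tuple(temp)
--             if odd <= k and temp2 not in mem:
--                 count += 1
--
--             mem.add(temp2)
--
--     return count
-- ===== SOURCE B (Python) =====
-- def evenSubarray(numbers, k):
--     # incremental suffix-trie: nodes are ids, edges keyed by (node, value);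
--     # a node is created exactly when a new distinct subarray with <= k odds appears
--     children = {}
--     next_id = 1
--     count = 0
--     for i in range(len(numbers)):
--         node = 0
--         odd = 0
--         for x in numbers[i:]:
--             if x % 2:
--                 odd += 1
--             if odd > k:
--                 break
--             child = children.get((node, x))
--             if child is None:
--                 child = next_id
--                 children[(node, x)] = child
--                 next_id += 1
--                 count += 1
--             node = child
--     return count
-- ===== Notes on version B (the rewrite author's own statement) =====
-- stated objective: faster
-- what changed: B replaces A's hash set of materialized subarray tuples by an incremental suffix trie (edges keyed by (node, value) in a dict); duplicates are detected by walking the trie and a qualifying distinct subarray is counted exactly when its node is created, with the walk stopping once the odd budget is exhausted.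
import Mathlib
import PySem

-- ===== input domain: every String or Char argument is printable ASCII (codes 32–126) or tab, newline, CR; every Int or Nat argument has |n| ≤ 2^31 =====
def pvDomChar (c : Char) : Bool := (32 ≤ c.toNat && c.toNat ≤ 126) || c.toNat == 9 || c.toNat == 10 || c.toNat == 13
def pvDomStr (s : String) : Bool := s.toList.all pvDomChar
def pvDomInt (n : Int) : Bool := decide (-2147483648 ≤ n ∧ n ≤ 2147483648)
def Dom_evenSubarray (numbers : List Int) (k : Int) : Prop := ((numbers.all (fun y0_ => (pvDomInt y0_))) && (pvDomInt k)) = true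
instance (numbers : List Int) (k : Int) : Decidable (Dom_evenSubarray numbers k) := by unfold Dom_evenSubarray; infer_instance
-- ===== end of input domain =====

-- B replaces A's hash set of materialized subarray tuples by an incremental suffix trie: edges are a
-- dict keyed by (node, value), a distinct qualifying subarray is counted exactly when its node is
-- created, and each walk stops once the odd budget is exhausted.

-- ===== PORT A =====
-- inner-loop body of A: state is (count, mem, temp, odd); j is the scanned index (always in range)
def stepA (numbers : List Int) (k : Int)
    (st : Int × PySem.Set (List Int) × List Int × Int) (j : Int) :
    Int × PySem.Set (List Int) × List Int × Int :=
  let x := PySem.List.pyGetD numbers j 0   -- j ∈ [i, n): index always in range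
  let odd := if PySem.Int.mod x 2 ≠ 0 then st.2.2.2 + 1 else st.2.2.2
  let temp := st.2.2.1 ++ [x]
  let count := if odd ≤ k ∧ temp ∉ st.2.1 then st.1 + 1 else st.1
  (count, PySem.Set.add st.2.1 temp, temp, odd)

def evenSubarray (numbers : List Int) (k : Int) : Int :=
  let n : Int := numbers.length
  ((PySem.List.pyRange 0 n 1).foldl
    (fun (st : Int × PySem.Set (List Int)) i =>
      let r := (PySem.List.pyRange i n 1).foldl (stepA numbers k) (st.1, st.2, [], 0)
      (r.1, r.2.1))
    (0, PySem.Set.empty)).1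

-- ===== PORT B =====
-- inner loop of B: walk/extend the trie along the suffix, break once odd > k
def altInner (k : Int) : List Int → Int → Int → PySem.Dict (Int × Int) Int → Int → Int →
    PySem.Dict (Int × Int) Int × Int × Int
  | [], _, _, children, next_id, count => (children, next_id, count)
  | x :: rest, node, odd, children, next_id, count =>
    let odd' := if PySem.Int.mod x 2 ≠ 0 then odd + 1 else odd
    if odd' > k then (children, next_id, count)
    else
      match children.get? (node, x) with
      | some child => altInner k rest child odd' children next_id count
      | none => altInner k rest next_id odd' (children.insert (node, x) next_id) (next_id + 1) (count + 1)

def evenSubarray_alt (numbers : List Int) (k : Int) : Int :=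
  ((List.range numbers.length).foldl
    (fun (st : PySem.Dict (Int × Int) Int × Int × Int) (i : Nat) =>
      altInner k (PySem.List.slice numbers (some (i : Int)) none) 0 0 st.1 st.2.1 st.2.2)
    (PySem.Dict.empty, 1, 0)).2.2

-- ===== PRECONDITION & SPEC =====
def Spec_evenSubarray (numbers : List Int) (k : Int) (out : Int) : Prop := out = evenSubarray_alt numbers k
instance (numbers : List Int) (k : Int) (out : Int) : Decidable (Spec_evenSubarray numbers k out) := by unfold Spec_evenSubarray; infer_instance

-- ===== CLAIM (what is proved, stated in full; the proofs are below) =====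
def Claim_equal_evenSubarray : Prop := ∀ (numbers : List Int) (k : Int), Dom_evenSubarray numbers k → Spec_evenSubarray numbers k (evenSubarray numbers k)

-- ===== LEMMAS AND PROOFS =====

-- number of odd elements of a tuple
def oc (t : List Int) : Nat := t.countP (fun x => decide (PySem.Int.mod x 2 ≠ 0))

-- "at most k odds" test
def qb (k : Int) (t : List Int) : Bool := decide ((oc t : Int) ≤ k)

-- the subarray numbers[i : i+m+1]
def rowTup (numbers : List Int) (i m : Nat) : List Int := (numbers.drop i).take (m+1)

-- the first c subarrays starting at i
def rowList (numbers : List Int) (i c : Nat) : List (List Int) := (List.range c).map (rowTup numbers i)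

-- all subarrays, in A's traversal order
def allList (numbers : List Int) : List (List Int) :=
  (List.range numbers.length).flatMap (fun i => rowList numbers i (numbers.length - i))

-- the number of distinct qualifying tuples among ps
def cnt (k : Int) (ps : List (List Int)) : Int :=
  (((PySem.Set.ofList ps).filter (qb k)).length : Int)

lemma oc_append_singleton (t : List Int) (x : Int) :
    oc (t ++ [x]) = oc t + (if PySem.Int.mod x 2 ≠ 0 then 1 else 0) := by
  simp [oc, List.countP_append, List.countP_cons]

lemma cnt_append_singleton (k : Int) (ps : List (List Int)) (t : List Int) :
    cnt k (ps ++ [t]) =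
      if (oc t : Int) ≤ k ∧ t ∉ PySem.Set.ofList ps then cnt k ps + 1 else cnt k ps := by
  unfold cnt
  rw [PySem.Set.ofList_append_singleton, PySem.Set.add_eq_ite]
  by_cases hm : t ∈ PySem.Set.ofList ps
  · simp [hm]
  · simp only [hm, if_false]
    by_cases hq : (oc t : Int) ≤ k
    · simp [List.filter_append, qb, hq]
    · simp [List.filter_append, qb, hq]

lemma stepA_eq (numbers : List Int) (k : Int) (j : Nat) (hj : j < numbers.length)
    (ps : List (List Int)) (temp : List Int) :
    stepA numbers k (cnt k ps, PySem.Set.ofList ps, temp, (oc temp : Int)) ((j : Nat) : Int) =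
      (cnt k (ps ++ [temp ++ [numbers[j]]]), PySem.Set.ofList (ps ++ [temp ++ [numbers[j]]]),
       temp ++ [numbers[j]], (oc (temp ++ [numbers[j]]) : Int)) := by
  have hx : PySem.List.pyGetD numbers ((j : Nat) : Int) 0 = numbers[j] := by
    simp [List.getD_eq_getElem, List.getElem?_eq_getElem hj]
  have hodd : (if PySem.Int.mod numbers[j] 2 ≠ 0 then (oc temp : Int) + 1 else (oc temp : Int))
      = (oc (temp ++ [numbers[j]]) : Int) := by
    rw [oc_append_singleton]; split_ifs <;> push_cast <;> ring
  unfold stepA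
  simp only [hx, hodd]
  rw [cnt_append_singleton, PySem.Set.ofList_append_singleton]

lemma rowTup_succ (numbers : List Int) (i m : Nat) (h : i + m < numbers.length) :
    (numbers.drop i).take (m+1) = (numbers.drop i).take m ++ [numbers[i+m]] := by
  rw [List.take_succ]
  simp [List.getElem?_drop, List.getElem?_eq_getElem h]

lemma innerA (numbers : List Int) (k : Int) (i : Nat) :
    ∀ (m : Nat), i + m ≤ numbers.length → ∀ (ps : List (List Int)),
    (List.range m).foldl (fun st (t : Nat) => stepA numbers k st ((i : Int) + (t : Int)))
        (cnt k ps, PySem.Set.ofList ps, [], 0) =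
      (cnt k (ps ++ rowList numbers i m), PySem.Set.ofList (ps ++ rowList numbers i m),
       (numbers.drop i).take m, (oc ((numbers.drop i).take m) : Int)) := by
  intro m
  induction m with
  | zero => intro _ ps; simp [rowList, oc]
  | succ m ih =>
    intro hm ps
    have hm' : i + m < numbers.length := by omega
    rw [List.range_succ, List.foldl_append, ih (by omega) ps]
    have hcast : ((i : Int) + (m : Int)) = (((i + m : Nat)) : Int) := by push_cast; ring
    have hrt : (numbers.drop i).take m ++ [numbers[i+m]] = (numbers.drop i).take (m+1) :=
      (rowTup_succ numbers i m hm').symm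
    have hrl : rowList numbers i (m+1) = rowList numbers i m ++ [rowTup numbers i m] := by
      simp [rowList, List.range_succ]
    simp only [List.foldl_cons, List.foldl_nil, hcast]
    rw [stepA_eq numbers k (i+m) hm', hrt, hrl, ← List.append_assoc]
    rfl

lemma outerA (numbers : List Int) (k : Int) :
    ∀ (m : Nat), m ≤ numbers.length →
    (List.range m).foldl
        (fun (st : Int × PySem.Set (List Int)) (i : Nat) =>
          let r := (PySem.List.pyRange (i : Int) (numbers.length : Int) 1).foldl (stepA numbers k) (st.1, st.2, [], 0)
          (r.1, r.2.1))
        (0, PySem.Set.empty) =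
      (cnt k ((List.range m).flatMap (fun i => rowList numbers i (numbers.length - i))),
       PySem.Set.ofList ((List.range m).flatMap (fun i => rowList numbers i (numbers.length - i)))) := by
  intro m
  induction m with
  | zero => intro _; rfl
  | succ m ih =>
    intro hm
    rw [List.range_succ, List.foldl_append, ih (by omega)]
    simp only [List.foldl_cons, List.foldl_nil]
    have h1 : PySem.List.pyRange (m : Int) (numbers.length : Int) 1
        = (List.range (numbers.length - m)).map (fun t : Nat => (m : Int) + (t : Int)) := by
      rw [PySem.List.pyRange_one,
        show (((numbers.length : Int)) - ((m : Nat) : Int)).toNat = numbers.length - m by omega]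
    rw [h1, List.foldl_map]
    have h2 := innerA numbers k m (numbers.length - m) (by omega)
        ((List.range m).flatMap (fun i => rowList numbers i (numbers.length - i)))
    simp only [h2, List.flatMap_append, List.flatMap_cons, List.flatMap_nil,
      List.append_nil]

lemma A_eq (numbers : List Int) (k : Int) :
    evenSubarray numbers k = cnt k (allList numbers) := by
  change ((PySem.List.pyRange 0 (numbers.length : Int) 1).foldl
    (fun (st : Int × PySem.Set (List Int)) i =>
      let r := (PySem.List.pyRange i (numbers.length : Int) 1).foldl (stepA numbers k) (st.1, st.2, [], 0)
      (r.1, r.2.1))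
    (0, PySem.Set.empty)).1 = cnt k (allList numbers)
  have h0 : PySem.List.pyRange 0 (numbers.length : Int) 1
      = (List.range numbers.length).map (fun t : Nat => ((t : Nat) : Int)) := by
    rw [PySem.List.pyRange_one]
    simp
  rw [h0, List.foldl_map, outerA numbers k numbers.length le_rfl]
  rfl

-- ===== B-side: the trie invariant =====

-- the value the trie must answer at key (p, x): the index of ids[p] ++ [x] in ids, if any
def nodeIdx (ids : List (List Int)) (p x : Int) : Option Int :=
  (if 0 ≤ p then ids[p.toNat]? else none).bind
    (fun lp => (PySem.List.index? ids (lp ++ [x])).map (fun n => ((n : Nat) : Int)))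

-- invariant: ids lists the node representatives in creation order, node m represents ids[m]
def TrieInv (children : PySem.Dict (Int × Int) Int) (ids : List (List Int)) : Prop :=
  ids.Nodup ∧ ids.head? = some [] ∧ (∀ l x, l ++ [x] ∈ ids → l ∈ ids) ∧
  (∀ p x, children.get? (p, x) = nodeIdx ids p x)

lemma oc_append (a b : List Int) : oc (a ++ b) = oc a + oc b := by
  simp [oc, List.countP_append]

lemma TrieInv_insert (children : PySem.Dict (Int × Int) Int) (ids : List (List Int))
    (cur : List Int) (x : Int) (m : Nat)
    (hInv : TrieInv children ids) (hm : ids[m]? = some cur) (hnot : cur ++ [x] ∉ ids) :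
    TrieInv (children.insert ((m : Int), x) (ids.length : Int)) (ids ++ [cur ++ [x]]) := by
  obtain ⟨hnd, hhead, hpc, hget⟩ := hInv
  obtain ⟨hmlt, hma⟩ := List.getElem?_eq_some_iff.mp hm
  have hcurmem : cur ∈ ids := hma ▸ List.getElem_mem hmlt
  refine ⟨?_, ?_, ?_, ?_⟩
  · rw [List.nodup_append]
    refine ⟨hnd, by simp, ?_⟩
    intro a ha b hb
    rw [List.eq_of_mem_singleton hb]
    intro hab
    rw [hab] at ha
    exact hnot ha
  · cases ids with
    | nil => simp at hhead
    | cons h t => simpa using hhead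
  · intro l y hly
    rcases List.mem_append.mp hly with h | h
    · exact List.mem_append_left _ (hpc l y h)
    · simp only [List.mem_singleton] at h
      obtain ⟨rfl, heq⟩ := List.append_inj' h rfl
      exact List.mem_append_left _ hcurmem
  · intro p y
    rw [PySem.Dict.get?_insert]
    by_cases hkey : (p, y) = ((m : Int), x)
    · rw [if_pos hkey]
      rw [Prod.mk.injEq] at hkey
      obtain ⟨hp, hy⟩ := hkey
      rw [hp, hy]
      unfold nodeIdx
      rw [if_pos (by positivity)]
      simp only [Int.toNat_natCast]
      rw [List.getElem?_append_left hmlt, hm]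
      simp only [Option.bind_some]
      rw [PySem.List.index?_append_singleton_self ids (cur ++ [x]) hnot]
      simp
    · rw [if_neg hkey, hget p y]
      unfold nodeIdx
      by_cases hp : 0 ≤ p
      · rw [if_pos hp, if_pos hp]
        by_cases hpn : p.toNat < ids.length
        · rw [List.getElem?_append_left hpn]
          cases hlp : ids[p.toNat]? with
          | none => simp
          | some lp =>
            simp only [Option.bind_some]
            by_cases hmem2 : lp ++ [y] ∈ ids
            · rw [PySem.List.index?_append_of_mem _ hmem2]
            · have h1 : PySem.List.index? ids (lp ++ [y]) = none :=
                (PySem.List.index?_eq_none_iff ids (lp ++ [y])).mpr hmem2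
              have h2 : lp ++ [y] ∉ ids ++ [cur ++ [x]] := by
                intro hmem3
                rcases List.mem_append.mp hmem3 with h3 | h3
                · exact hmem2 h3
                · simp only [List.mem_singleton] at h3
                  obtain ⟨rfl, hyx⟩ := List.append_inj' h3 rfl
                  have hyx' : y = x := by simpa using hyx
                  obtain ⟨hplt, hpa⟩ := List.getElem?_eq_some_iff.mp hlp
                  have : p.toNat = m := (List.Nodup.getElem_inj_iff hnd).mp (hpa.trans hma.symm)
                  exact hkey (by rw [hyx', ← this, Int.toNat_of_nonneg hp])
              rw [h1, (PySem.List.index?_eq_none_iff _ _).mpr h2]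
        · by_cases hpn2 : p.toNat = ids.length
          · rw [List.getElem?_eq_none (by omega), hpn2, List.getElem?_concat_length]
            simp only [Option.bind_some, Option.bind_none]
            have h2 : (cur ++ [x]) ++ [y] ∉ ids ++ [cur ++ [x]] := by
              intro hmem3
              rcases List.mem_append.mp hmem3 with h3 | h3
              · exact hnot (hpc _ _ h3)
              · simp only [List.mem_singleton] at h3
                have := congrArg List.length h3
                simp at this
            rw [(PySem.List.index?_eq_none_iff _ _).mpr h2]
            simp
          · rw [List.getElem?_eq_none (by omega), List.getElem?_eq_none (by simp; omega)]
            simp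
      · rw [if_neg hp, if_neg hp]
        simp

lemma mem_shift (rest : List Int) (x : Int) (cur l : List Int) (k : Int)
    (h0 : (oc (cur ++ [x]) : Int) ≤ k) :
    ((l = cur ++ [x] ∨ ∃ t : Nat, t < rest.length ∧ l = (cur ++ [x]) ++ rest.take (t+1) ∧
        (oc ((cur ++ [x]) ++ rest.take (t+1)) : Int) ≤ k)
     ↔ ∃ t : Nat, t < (x :: rest).length ∧ l = cur ++ (x :: rest).take (t+1) ∧
        (oc (cur ++ (x :: rest).take (t+1)) : Int) ≤ k) := by
  have hs : ∀ t : Nat, cur ++ (x :: rest).take (t+1) = (cur ++ [x]) ++ rest.take t := by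
    intro t
    simp [List.take_succ_cons]
  constructor
  · rintro (rfl | ⟨t, ht, rfl, hle⟩)
    · exact ⟨0, by simp, by simpa using (hs 0).symm ▸ rfl, by rw [hs 0]; simpa using h0⟩
    · exact ⟨t + 1, by simp; omega, by rw [hs (t+1)], by rw [hs (t+1)]; exact hle⟩
  · rintro ⟨t, ht, rfl, hle⟩
    cases t with
    | zero => left; simpa using (hs 0)
    | succ t =>
      right
      refine ⟨t, by simp at ht; omega, by rw [hs (t+1)], by rw [hs (t+1)] at hle; exact hle⟩

lemma altInner_spec (k : Int) :
    ∀ (rest cur : List Int) (m : Nat) (children : PySem.Dict (Int × Int) Int)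
      (ids : List (List Int)),
    TrieInv children ids → ids[m]? = some cur →
    ∃ (children' : PySem.Dict (Int × Int) Int) (ids' : List (List Int)),
      altInner k rest ((m : Nat) : Int) ((oc cur : Int)) children (ids.length : Int) ((ids.length : Int) - 1)
        = (children', (ids'.length : Int), (ids'.length : Int) - 1) ∧
      TrieInv children' ids' ∧
      (∀ l, l ∈ ids' ↔ l ∈ ids ∨
        ∃ t : Nat, t < rest.length ∧ l = cur ++ rest.take (t+1) ∧ (oc (cur ++ rest.take (t+1)) : Int) ≤ k) := by
  intro rest
  induction rest with
  | nil =>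
    intro cur m children ids hInv hm
    exact ⟨children, ids, rfl, hInv, by simp⟩
  | cons x rest ih =>
    intro cur m children ids hInv hm
    have hodd : (if PySem.Int.mod x 2 ≠ 0 then (oc cur : Int) + 1 else (oc cur : Int))
        = (oc (cur ++ [x]) : Int) := by
      rw [oc_append_singleton]; split_ifs <;> push_cast <;> ring
    simp only [altInner, hodd]
    by_cases hq : (oc (cur ++ [x]) : Int) > k
    · rw [if_pos hq]
      refine ⟨children, ids, rfl, hInv, ?_⟩
      intro l
      constructor
      · intro h; exact Or.inl h
      · rintro (h | ⟨t, ht, rfl, hle⟩)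
        · exact h
        · exfalso
          have hs : cur ++ (x :: rest).take (t+1) = (cur ++ [x]) ++ rest.take t := by
            simp [List.take_succ_cons]
          rw [hs, oc_append] at hle
          push_cast at hle
          omega
    · rw [if_neg hq]
      have hle0 : (oc (cur ++ [x]) : Int) ≤ k := by omega
      have hget := hInv.2.2.2
      have hni : children.get? (((m : Nat) : Int), x)
          = (PySem.List.index? ids (cur ++ [x])).map (fun n => ((n : Nat) : Int)) := by
        rw [hget]
        unfold nodeIdx
        rw [if_pos (by positivity)]
        simp only [Int.toNat_natCast]
        rw [hm]
        simp
      by_cases hmem : cur ++ [x] ∈ ids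
      · obtain ⟨j, hj⟩ := Option.isSome_iff_exists.mp ((PySem.List.index?_isSome_iff ids (cur ++ [x])).mpr hmem)
        obtain ⟨hjlt, hjval, _⟩ := PySem.List.getElem_of_index?_eq_some hj
        rw [hni, hj]
        simp only [Option.map_some]
        obtain ⟨children', ids', heq, hInv', hmem'⟩ :=
          ih (cur ++ [x]) j children ids hInv (by rw [List.getElem?_eq_getElem hjlt, hjval])
        refine ⟨children', ids', heq, hInv', ?_⟩
        intro l
        rw [hmem' l]
        constructor
        · rintro (h | h)
          · exact Or.inl h
          · exact Or.inr ((mem_shift rest x cur _ k hle0).mp (Or.inr h))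
        · rintro (h | h)
          · exact Or.inl h
          · rcases (mem_shift rest x cur _ k hle0).mpr h with rfl | h2
            · exact Or.inl hmem
            · exact Or.inr h2
      · rw [hni, (PySem.List.index?_eq_none_iff ids (cur ++ [x])).mpr hmem]
        simp only [Option.map_none]
        have hInv1 := TrieInv_insert children ids cur x m hInv hm hmem
        have hm1 : (ids ++ [cur ++ [x]])[ids.length]? = some (cur ++ [x]) :=
          List.getElem?_concat_length ..
        obtain ⟨children', ids', heq, hInv', hmem'⟩ :=
          ih (cur ++ [x]) ids.length (children.insert (((m : Nat) : Int), x) (ids.length : Int))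
            (ids ++ [cur ++ [x]]) hInv1 hm1
        have hlen : ((ids ++ [cur ++ [x]]).length : Int) = (ids.length : Int) + 1 := by
          simp
        rw [hlen] at heq
        refine ⟨children', ids', ?_, hInv', ?_⟩
        · rw [← heq]
          congr 1
          omega
        · intro l
          rw [hmem' l]
          constructor
          · rintro (h | h)
            · rcases List.mem_append.mp h with h2 | h2
              · exact Or.inl h2
              · simp only [List.mem_singleton] at h2
                subst h2
                exact Or.inr ((mem_shift rest x cur _ k hle0).mp (Or.inl rfl))
            · exact Or.inr ((mem_shift rest x cur _ k hle0).mp (Or.inr h))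
          · rintro (h | h)
            · exact Or.inl (List.mem_append_left _ h)
            · rcases (mem_shift rest x cur _ k hle0).mpr h with rfl | h2
              · exact Or.inl (List.mem_append_right _ (by simp))
              · exact Or.inr h2

lemma outerB (numbers : List Int) (k : Int) :
    ∀ (m : Nat), m ≤ numbers.length →
    ∃ (children : PySem.Dict (Int × Int) Int) (ids : List (List Int)),
    (List.range m).foldl
        (fun (st : PySem.Dict (Int × Int) Int × Int × Int) (i : Nat) =>
          altInner k (PySem.List.slice numbers (some (i : Int)) none) 0 0 st.1 st.2.1 st.2.2)
        (PySem.Dict.empty, 1, 0)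
      = (children, (ids.length : Int), (ids.length : Int) - 1) ∧
    TrieInv children ids ∧
    (∀ l, l ∈ ids ↔ l = [] ∨
      ∃ i : Nat, i < m ∧ ∃ t : Nat, t < numbers.length - i ∧ l = rowTup numbers i t ∧ (oc l : Int) ≤ k) := by
  intro m
  induction m with
  | zero =>
    intro _
    refine ⟨PySem.Dict.empty, [[]], by simp, ⟨by simp, rfl, by simp, ?_⟩, by simp⟩
    intro p x
    rw [PySem.Dict.get?_empty]
    unfold nodeIdx
    cases hif : (if 0 ≤ p then ([[]] : List (List Int))[p.toNat]? else none) with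
    | none => simp [hif]
    | some lp =>
      simp only [Option.bind_some]
      rw [(PySem.List.index?_eq_none_iff _ _).mpr (by simp)]
      simp
  | succ m ih =>
    intro hm
    obtain ⟨children, ids, heq, hInv, hmem⟩ := ih (by omega)
    rw [List.range_succ, List.foldl_append, heq]
    simp only [List.foldl_cons, List.foldl_nil]
    have hslice : PySem.List.slice numbers (some ((m : Nat) : Int)) none = numbers.drop m :=
      PySem.List.slice_from_natCast ..
    have hid0 : ids[0]? = some [] := by
      obtain ⟨_, hhead, _, _⟩ := hInv
      cases ids with
      | nil => simp at hhead
      | cons h t => simpa using hhead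
    have hconv : altInner k (numbers.drop m) 0 0 children (ids.length : Int) ((ids.length : Int) - 1)
        = altInner k (numbers.drop m) (((0 : Nat) : Nat) : Int) ((oc [] : Nat) : Int) children
            (ids.length : Int) ((ids.length : Int) - 1) := by
      norm_num [oc]
    obtain ⟨children', ids', heq', hInv', hmem'⟩ :=
      altInner_spec k (numbers.drop m) [] 0 children ids hInv hid0
    refine ⟨children', ids', by rw [hslice, hconv]; exact heq', hInv', ?_⟩
    intro l
    rw [hmem' l, hmem l]
    constructor
    · rintro ((rfl | ⟨i, hi, t, ht, rfl, hle⟩) | ⟨t, ht, rfl, hle⟩)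
      · exact Or.inl rfl
      · exact Or.inr ⟨i, by omega, t, ht, rfl, hle⟩
      · refine Or.inr ⟨m, by omega, t, ?_, by simp [rowTup], by simpa [rowTup] using hle⟩
        rw [List.length_drop] at ht
        omega
    · rintro (rfl | ⟨i, hi, t, ht, hlv, hle⟩)
      · exact Or.inl (Or.inl rfl)
      · by_cases him : i < m
        · exact Or.inl (Or.inr ⟨i, him, t, ht, hlv, hle⟩)
        · have : i = m := by omega
          subst this
          refine Or.inr ⟨t, ?_, by simpa [rowTup] using hlv, ?_⟩
          · rw [List.length_drop]; omega
          · subst hlv; simpa [rowTup] using hle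

lemma allList_mem_iff (numbers : List Int) (l : List Int) :
    l ∈ allList numbers ↔ ∃ i : Nat, i < numbers.length ∧ ∃ t : Nat, t < numbers.length - i ∧ l = rowTup numbers i t := by
  simp [allList, rowList, List.mem_flatMap, List.mem_map, List.mem_range]
  tauto

lemma allList_ne_nil (numbers : List Int) (l : List Int) (h : l ∈ allList numbers) : l ≠ [] := by
  rcases (allList_mem_iff numbers l).mp h with ⟨i, hi, t, ht, rfl⟩
  have hlen : (rowTup numbers i t).length = min (t+1) (numbers.length - i) := by
    simp [rowTup]
  intro hnil
  rw [hnil] at hlen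
  simp at hlen
  omega

lemma count_from_ids (numbers : List Int) (k : Int) (ids : List (List Int)) (hnd : ids.Nodup)
    (hmem : ∀ l, l ∈ ids ↔ l = [] ∨ (l ∈ allList numbers ∧ (oc l : Int) ≤ k)) :
    (ids.length : Int) - 1 = cnt k (allList numbers) := by
  have hF : ∀ l, l ∈ (PySem.Set.ofList (allList numbers)).filter (qb k) ↔
      (l ∈ allList numbers ∧ (oc l : Int) ≤ k) := by
    intro l
    simp [List.mem_filter, PySem.Set.mem_ofList, qb]
  have hFnd : ((PySem.Set.ofList (allList numbers)).filter (qb k)).Nodup :=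
    (PySem.Set.nodup_ofList _).filter _
  have hperm : ids.Perm ([] :: (PySem.Set.ofList (allList numbers)).filter (qb k)) := by
    rw [List.perm_ext_iff_of_nodup hnd
      (List.nodup_cons.mpr ⟨fun h => allList_ne_nil numbers [] ((hF []).mp h).1 rfl, hFnd⟩)]
    intro a
    rw [hmem a, List.mem_cons, hF a]
  have hlen := hperm.length_eq
  simp only [List.length_cons] at hlen
  unfold cnt
  omega

lemma B_eq (numbers : List Int) (k : Int) :
    evenSubarray_alt numbers k = cnt k (allList numbers) := by
  obtain ⟨children, ids, heq, hInv, hmem⟩ := outerB numbers k numbers.length le_rfl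
  unfold evenSubarray_alt
  rw [heq]
  obtain ⟨hnd, _, _, _⟩ := hInv
  refine count_from_ids numbers k ids hnd ?_
  intro l
  rw [hmem l, allList_mem_iff numbers l]
  constructor
  · rintro (rfl | ⟨i, hi, t, ht, hlv, hle⟩)
    · exact Or.inl rfl
    · exact Or.inr ⟨⟨i, hi, t, ht, hlv⟩, hle⟩
  · rintro (rfl | ⟨⟨i, hi, t, ht, hlv⟩, hle⟩)
    · exact Or.inl rfl
    · exact Or.inr ⟨i, hi, t, ht, hlv, hle⟩

-- ===== VERDICT (by name: the statement is the Claim_ definition above) =====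
theorem evenSubarray_spec : Claim_equal_evenSubarray := by
  intro numbers k _
  unfold Spec_evenSubarray
  rw [A_eq, B_eq]
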